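-- pv_equiv track=rewrite | github.com/jananjahedd/Imperative_programming | hehe.py | tricky_square
-- ===== SOURCE A (Python) =====
-- import math
--
-- def perfect_square(user_input):
--     sqrt_num = math.isqrt(user_input)
--     return sqrt_num * sqrt_num == user_input
--
-- def tricky_square(num):
--     if not perfect_square(num):
--         return False
--
--     number = str(num)
--     digit_count = [0] * 10
--
--     for digit in number:
--         digit_count[int(digit)] += 1
--
--     repeated = 0
--     for count in digit_count:
--         if count > 1:
--             repeated += 1
--
--     return repeated == 1
-- ===== SOURCE B (Python) =====
-- import math
-- from itertools import groupby
--
--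
-- def tricky_square(num):
--     r = math.isqrt(num)
--     if r * r != num:
--         return False
--     s = sorted(str(num))
--     return sum(1 for _, g in groupby(s) if len(list(g)) > 1) == 1
-- ===== Notes on version B (the rewrite author's own statement) =====
-- stated objective: idiomatic
-- what changed: Replaces the fixed-size per-digit histogram plus second counting scan with sorting the digit string and counting, groupby-style, the runs of equal adjacent characters that are longer than a single character.
import Mathlib
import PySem

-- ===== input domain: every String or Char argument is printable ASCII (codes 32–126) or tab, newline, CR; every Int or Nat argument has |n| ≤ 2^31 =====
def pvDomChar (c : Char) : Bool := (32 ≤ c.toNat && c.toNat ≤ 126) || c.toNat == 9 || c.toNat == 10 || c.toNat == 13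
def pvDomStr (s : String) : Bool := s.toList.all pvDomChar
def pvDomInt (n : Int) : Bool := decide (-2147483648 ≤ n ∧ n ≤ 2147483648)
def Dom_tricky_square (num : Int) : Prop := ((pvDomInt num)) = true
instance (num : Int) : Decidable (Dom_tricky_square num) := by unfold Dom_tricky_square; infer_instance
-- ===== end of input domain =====

-- B sorts the digit string and counts runs of repeated digits with a groupby-style scan,
-- instead of A's fixed-size histogram plus a second counting pass (idiomatic alternative; not claimed faster).


-- ===== PORT A =====
-- math.isqrt(n): exact for nonnegative n (Pre_ excludes negative n, where Python raises ValueError)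
def pvIsqrt (n : Int) : Int := (Nat.sqrt n.toNat : Int)

def perfect_square (user_input : Int) : Bool :=
  let sqrt_num := pvIsqrt user_input
  sqrt_num * sqrt_num == user_input

-- int(digit) ported as digit.toNat - 48: exact on decimal digit characters, the only characters of str(num) for nonnegative num
def tricky_square (num : Int) : Bool :=
  if !perfect_square num then false
  else
    let number := PySem.Int.toChars num
    let digit_count := number.foldl
      (fun dc digit => dc.set (digit.toNat - 48) (dc.getD (digit.toNat - 48) 0 + 1))
      (List.replicate 10 (0 : Int))
    let repeated := digit_count.foldl (fun r count => if count > 1 then r + 1 else r) (0 : Int)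
    repeated == 1

-- ===== PORT B =====
-- the groupby-based sum in Source B: walk maximal runs of equal adjacent chars, counting runs longer than a single char
def pvRunCount : List Char → Int
  | [] => 0
  | c :: rest =>
    (if rest.takeWhile (· == c) ≠ [] then 1 else 0) + pvRunCount (rest.dropWhile (· == c))
  termination_by s => s.length
  decreasing_by
    simp only [List.length_cons]
    exact Nat.lt_succ_of_le (List.length_dropWhile_le _ _)

def tricky_square_alt (num : Int) : Bool :=
  if (Nat.sqrt num.toNat : Int) * (Nat.sqrt num.toNat : Int) != num then false
  else
    let s := PySem.List.sorted (PySem.Int.toChars num) id false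
    pvRunCount s == 1

-- ===== PRECONDITION & SPEC =====
-- Pre_ excludes negative num, where math.isqrt (in both A and B) raises ValueError.
def Pre_tricky_square (num : Int) : Prop := 0 ≤ num
instance (num : Int) : Decidable (Pre_tricky_square num) := by unfold Pre_tricky_square; infer_instance
def pvWitness_tricky_square : Int := (36)

def Spec_tricky_square (num : Int) (out : Bool) : Prop := out = tricky_square_alt num
instance (num : Int) (out : Bool) : Decidable (Spec_tricky_square num out) := by unfold Spec_tricky_square; infer_instance

-- ===== CLAIM (what is proved, stated in full; the proofs are below) =====
def Claim_equal_tricky_square : Prop := ∀ (num : Int), Dom_tricky_square num → Pre_tricky_square num → Spec_tricky_square num (tricky_square num)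

-- ===== LEMMAS AND PROOFS =====


theorem digitChar_digit (d : Nat) (hd : d < 10) : 48 ≤ (Nat.digitChar d).toNat ∧ (Nat.digitChar d).toNat ≤ 57 := by
  interval_cases d <;> decide

theorem toDigitsCore_digits (fuel n : Nat) (ds : List Char)
    (hds : ∀ c ∈ ds, 48 ≤ c.toNat ∧ c.toNat ≤ 57) :
    ∀ c ∈ Nat.toDigitsCore 10 fuel n ds, 48 ≤ c.toNat ∧ c.toNat ≤ 57 := by
  induction fuel generalizing n ds with
  | zero => simpa [Nat.toDigitsCore] using hds
  | succ f ih =>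
    rw [Nat.toDigitsCore]
    have hd : ∀ c ∈ (n % 10).digitChar :: ds, 48 ≤ c.toNat ∧ c.toNat ≤ 57 := by
      intro c hc
      rcases List.mem_cons.mp hc with h | h
      · subst h; exact digitChar_digit _ (Nat.mod_lt _ (by omega))
      · exact hds c h
    split
    · exact hd
    · exact ih _ _ hd

theorem toChars_digits (num : Int) (h : 0 ≤ num) :
    ∀ c ∈ PySem.Int.toChars num, 48 ≤ c.toNat ∧ c.toNat ≤ 57 := by
  unfold PySem.Int.toChars
  rw [if_neg (by omega)]
  exact toDigitsCore_digits _ _ _ (by simp) 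


theorem hist_length (l : List Char) (dc : List Int) :
    (l.foldl (fun dc digit => dc.set (digit.toNat - 48) (dc.getD (digit.toNat - 48) 0 + 1)) dc).length
      = dc.length := by
  induction l generalizing dc with
  | nil => rfl
  | cons c l ih => rw [List.foldl_cons, ih, List.length_set]

theorem hist_getElem (l : List Char) (dc : List Int) (i : Nat) (hi : i < dc.length) :
    (l.foldl (fun dc digit => dc.set (digit.toNat - 48) (dc.getD (digit.toNat - 48) 0 + 1)) dc).getD i 0
      = dc.getD i 0 + (l.countP (fun c => c.toNat - 48 == i) : Int) := by
  induction l generalizing dc with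
  | nil => simp
  | cons c l ih =>
    rw [List.foldl_cons, ih _ (by simpa using hi), List.countP_cons]
    by_cases hc : c.toNat - 48 = i
    · subst hc
      rw [List.getD_eq_getElem?_getD, List.getElem?_set_self' ]
      simp [hi, List.getD_eq_getElem?_getD]
      ring
    · rw [List.getD_eq_getElem?_getD, List.getElem?_set_ne hc]
      simp [hc, List.getD_eq_getElem?_getD]

theorem not_mem_dropWhile_beq (c : Char) (rest : List Char)
    (hpw : rest.Pairwise (· ≤ ·)) (hle : ∀ x ∈ rest, c ≤ x) :
    c ∉ rest.dropWhile (· == c) := by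
  induction rest with
  | nil => simp
  | cons a l ih =>
    by_cases hac : (a == c) = true
    · simp only [List.dropWhile_cons, if_pos hac]
      exact ih (hpw.sublist (List.sublist_cons_self a l))
        (fun x hx => hle x (List.mem_cons_of_mem a hx))
    · simp only [List.dropWhile_cons, if_neg hac]
      intro hc
      have hane : a ≠ c := by simpa using hac
      rcases List.mem_cons.mp hc with h | h
      · exact hane h.symm
      · have hca : c ≤ a := hle a (List.mem_cons_self)
        have hac2 : a ≤ c := (List.pairwise_cons.mp hpw).1 c h
        exact hane (le_antisymm hac2 hca)

theorem runCount_eq (s : List Char) (hs : s.Pairwise (· ≤ ·)) :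
    pvRunCount s = (((s.toFinset.filter (fun c => 1 < s.count c)).card : Nat) : Int) := by
  induction s using pvRunCount.induct with
  | case1 => simp [pvRunCount]
  | case2 c rest ih =>
    set w := rest.takeWhile (· == c) with hw
    set t := rest.dropWhile (· == c) with ht
    have hrest : w ++ t = rest := List.takeWhile_append_dropWhile
    have hwc : ∀ x ∈ w, x = c := fun x hx => eq_of_beq (List.mem_takeWhile_imp (p := fun x => x == c) hx)
    have htsub : t.Sublist rest := List.dropWhile_sublist _
    have hrest_pw : rest.Pairwise (· ≤ ·) := (List.pairwise_cons.mp hs).2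
    have hcle : ∀ x ∈ rest, c ≤ x := (List.pairwise_cons.mp hs).1
    have htpw : t.Pairwise (· ≤ ·) := hrest_pw.sublist htsub
    have hct : c ∉ t := not_mem_dropWhile_beq c rest hrest_pw hcle
    have hcount_c : (c :: rest).count c = 1 + w.length := by
      rw [← hrest]
      simp [List.count_append, List.count_eq_zero.mpr hct]
      rw [List.count_eq_length.mpr (fun x hx => (hwc x hx).symm)]
      omega
    have hcount_ne : ∀ x, x ≠ c → (c :: rest).count x = t.count x := by
      intro x hx
      rw [← hrest]
      simp [List.count_append, Ne.symm hx,
        List.count_eq_zero.mpr (fun hmem => hx (hwc x hmem))]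
    have hfins : (c :: rest).toFinset = insert c t.toFinset := by
      rw [← hrest]
      ext x
      simp [List.mem_toFinset, or_comm]
      constructor
      · rintro (h1 | h1 | h1)
        · exact Or.inl h1
        · exact Or.inr h1
        · exact Or.inl (hwc x h1)
      · rintro (h1 | h1)
        · exact Or.inl h1
        · exact Or.inr (Or.inl h1)
    rw [pvRunCount, ih htpw, hfins, Finset.filter_insert]
    have hfcong : Finset.filter (fun x => 1 < (c :: rest).count x) t.toFinset
        = Finset.filter (fun x => 1 < t.count x) t.toFinset := by
      apply Finset.filter_congr
      intro x hx
      have hxne : x ≠ c := fun h => hct (h ▸ List.mem_toFinset.mp hx)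
      rw [hcount_ne x hxne]
    by_cases hwne : w ≠ []
    · have h1 : 1 < (c :: rest).count c := by
        rw [hcount_c]
        have : w.length ≠ 0 := by simpa [List.length_eq_zero_iff] using hwne
        omega
      rw [if_pos h1, if_pos hwne, hfcong,
        Finset.card_insert_of_notMem (by simp [hct])]
      push_cast; ring
    · have hwnil : w = [] := by simpa using hwne
      have h1 : ¬ 1 < (c :: rest).count c := by rw [hcount_c, hwnil]; simp
      rw [if_neg h1, if_neg hwne, hfcong]
      simp

theorem card_filter_range (n : Nat) (P : Nat → Prop) [DecidablePred P] :
    ((Finset.range n).filter P).card = (List.range n).countP (fun i => decide (P i)) := by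
  induction n with
  | zero => simp
  | succ m ih =>
    rw [Finset.range_add_one, Finset.filter_insert, List.range_succ, List.countP_append]
    by_cases h : P m
    · rw [if_pos h, Finset.card_insert_of_notMem (by simp)]
      simp [h, ih]
    · rw [if_neg h]
      simp [h, ih]

theorem digitChar_inj : ∀ i < 10, ∀ j < 10, Nat.digitChar i = Nat.digitChar j → i = j := by decide

theorem digitChar_of_digit (c : Char) (h1 : 48 ≤ c.toNat) (h2 : c.toNat ≤ 57) :
    Nat.digitChar (c.toNat - 48) = c := by
  apply Char.ext
  apply UInt32.toNat_inj.mp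
  show (Nat.digitChar (c.toNat - 48)).toNat = c.toNat
  set k := c.toNat with hk
  interval_cases k <;> decide

theorem tricky_square_spec' (num : Int) (h : 0 ≤ num) :
    tricky_square num = tricky_square_alt num := by
  unfold tricky_square tricky_square_alt perfect_square pvIsqrt
  by_cases hsq : ((Nat.sqrt num.toNat : Int) * (Nat.sqrt num.toNat : Int) == num) = true
  · rw [if_neg (by simp; exact eq_of_beq hsq), if_neg (by simp; exact eq_of_beq hsq)]
    set l := PySem.Int.toChars num with hl
    set s := PySem.List.sorted l id false with hsdef
    have hdig := toChars_digits num h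
    have hs : s.Pairwise (· ≤ ·) := by
      have := PySem.List.sorted_pairwise l id
      simpa using this
    have hperm : s.Perm l := PySem.List.sorted_perm l id false
    -- Step 1: the histogram list is the per-digit-value count table
    have hhist : l.foldl
        (fun dc digit => dc.set (digit.toNat - 48) (dc.getD (digit.toNat - 48) 0 + 1))
        (List.replicate 10 (0 : Int))
        = (List.range 10).map (fun i => (l.countP (fun c => c.toNat - 48 == i) : Int)) := by
      apply List.ext_getElem
      · rw [hist_length]; simp
      · intro i h1 h2
        have hi10 : i < 10 := by rw [hist_length] at h1; simpa using h1
        rw [← List.getD_eq_getElem _ 0 h1, hist_getElem _ _ _ (by simpa using hi10),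
          List.getD_eq_getElem _ _ (by simpa using hi10), List.getElem_replicate,
          List.getElem_map, List.getElem_range]
        simp
    -- Step 2: count over range 10 as a Finset card
    have hrange : (List.range 10).countP
          ((fun x => decide (x > 1)) ∘ (fun i => (l.countP (fun c => c.toNat - 48 == i) : Int)))
        = ((Finset.range 10).filter (fun i => 1 < l.count (Nat.digitChar i))).card := by
      rw [card_filter_range]
      apply List.countP_congr
      intro i hi
      have hi10 : i < 10 := by simpa using hi
      have hcnt : l.countP (fun c => c.toNat - 48 == i) = l.count (Nat.digitChar i) := by
        rw [List.count]
        apply List.countP_congr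
        intro c hc
        have hd := hdig c hc
        constructor
        · intro hb
          have : c.toNat - 48 = i := by simpa using hb
          simp [← this, digitChar_of_digit c hd.1 hd.2]
        · intro hb
          have hcd : c = Nat.digitChar i := by simpa using hb
          have : c.toNat - 48 = i := by
            apply digitChar_inj _ (by omega) _ hi10
            rw [digitChar_of_digit c hd.1 hd.2, hcd]
          simpa using this
      simp only [Function.comp, decide_eq_true_iff, gt_iff_lt]
      rw [hcnt]
      exact_mod_cast Iff.rfl
    -- Step 3: bijection between repeated digit values and repeated digit characters
    have hbij : ((Finset.range 10).filter (fun i => 1 < l.count (Nat.digitChar i))).card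
        = (l.toFinset.filter (fun c => 1 < l.count c)).card := by
      apply Finset.card_bij (fun i _ => Nat.digitChar i)
      · intro i hi
        simp only [Finset.mem_filter, Finset.mem_range] at hi
        simp only [Finset.mem_filter, List.mem_toFinset]
        exact ⟨List.count_pos_iff.mp (by omega), hi.2⟩
      · intro i hi j hj hij
        simp only [Finset.mem_filter, Finset.mem_range] at hi hj
        exact digitChar_inj i hi.1 j hj.1 hij
      · intro c hc
        simp only [Finset.mem_filter, List.mem_toFinset] at hc
        have hd := hdig c hc.1
        refine ⟨c.toNat - 48, ?_, digitChar_of_digit c hd.1 hd.2⟩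
        simp only [Finset.mem_filter, Finset.mem_range]
        rw [digitChar_of_digit c hd.1 hd.2]
        exact ⟨by omega, hc.2⟩
    -- A's digit-part value
    have hA : List.foldl (fun r count => if count > 1 then r + 1 else r) (0:Int)
          (l.foldl (fun dc digit => dc.set (digit.toNat - 48) (dc.getD (digit.toNat - 48) 0 + 1))
            (List.replicate 10 (0 : Int)))
        = (((l.toFinset.filter (fun c => 1 < l.count c)).card : Nat) : Int) := by
      rw [hhist, PySem.List.foldl_ite_add_one (fun count => count > 1), List.countP_map,
        hrange, hbij]
      simp
    -- B's digit-part value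
    have hB : pvRunCount s = (((l.toFinset.filter (fun c => 1 < l.count c)).card : Nat) : Int) := by
      rw [runCount_eq s hs]
      congr 2
      rw [← List.toFinset_eq_of_perm s l hperm]
      apply Finset.filter_congr
      intro x _
      rw [hperm.count_eq]
    show (List.foldl (fun r count => if count > 1 then r + 1 else r) (0:Int)
          (l.foldl (fun dc digit => dc.set (digit.toNat - 48) (dc.getD (digit.toNat - 48) 0 + 1))
            (List.replicate 10 (0 : Int))) == 1)
        = (pvRunCount s == 1)
    rw [hA, hB]
  · rw [if_pos (by simpa using hsq), if_pos (by simpa using hsq)]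

-- ===== VERDICT (by name: the statement is the Claim_ definition above) =====
theorem tricky_square_spec : Claim_equal_tricky_square := by
  intro num _ hpre
  exact tricky_square_spec' num hpre
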